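-- pv_equiv track=rewrite | github.com/PavelGolkin/Kernighan-Lin_methods | main.py | Kernigan_Lin_for_all_vertices_w_edge
-- ===== SOURCE A (Python) =====
-- def Kernigan_Lin_for_all_vertices_w_edge(graph):
--     def KL_for_all_experimental(graph):
--         n = len(graph)
--         A = {v: v for v in range(n // 2)}
--         B = {v: v for v in range(n // 2, n)}
--
--         cut = checking_sze(graph, A.keys(), B.keys())
--         chck = True
--         step = 0
--
--         while chck:
--             chck = False
--             for th in A.keys():
--                 best = 0
--                 best_vert = None
--
--                 for ht in B.keys():
--
--                     if graph[th][ht] == 1: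
--                         step += 1
--                         bt = chcking_bet(graph, th, ht, A.values(), B.values())
--
--                         if bt > best:
--                             best = bt
--                             best_vert = ht
--
--                 if best_vert is not None:
--                     A[th] = B[best_vert]
--                     B[best_vert] = th
--                     cut += best
--                     chck = True
--
--             return list(A.values()), list(B.values()), cut, step
--
--     def checking_sze(graph, A, B):
--         size = 0
--
--         for i in A:
--             for j in B:
--                 size += graph[i][j]
--
--         return size
--
--
--     def chcking_bet(graph, i, j, A, B):
--         bet = 0
--
--         for k in A:
--             bet -= graph[i][k]
--             bet += graph[j][k]
--
--         for k in B:
--             bet -= graph[j][k]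
--             bet += graph[i][k]
--
--         bet += graph[i][i]
--         bet += graph[j][j]
--         bet -= 2 * graph[i][j]
--
--         return bet
--
--     return KL_for_all_experimental(graph)
-- ===== SOURCE B (Python) =====
-- def Kernigan_Lin_for_all_vertices_w_edge(graph):
--     n = len(graph)
--     h = n // 2
--     # per-vertex sums of edge weights to the current A side / B side
--     SA = [sum(graph[v][k] for k in range(h)) for v in range(n)]
--     SB = [sum(graph[v][k] for k in range(h, n)) for v in range(n)]
--     cut = sum(SB[i] for i in range(h))
--     Aval = list(range(h))
--     Bval = list(range(h, n))
--     step = 0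
--     for th in range(h):
--         best = 0
--         best_vert = None
--         for ht in range(h, n):
--             if graph[th][ht] == 1:
--                 step += 1
--                 bt = (SA[ht] - SA[th]) + (SB[th] - SB[ht]) \
--                      + graph[th][th] + graph[ht][ht] - 2 * graph[th][ht]
--                 if bt > best:
--                     best = bt
--                     best_vert = ht
--         if best_vert is not None:
--             pos = best_vert - h
--             w = Bval[pos]
--             Aval[th] = w
--             Bval[pos] = th
--             cut += best
--             for v in range(n):
--                 d = graph[v][w] - graph[v][th]
--                 SA[v] += d
--                 SB[v] -= d
--     return Aval, Bval, cut, step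
-- ===== Notes on version B (the rewrite author's own statement) =====
-- stated objective: alternative
-- what changed: Replaces the O(n) gain recomputation (chcking_bet scans both partitions for every candidate edge) by precomputed per-vertex sums SA/SB to the current A- and B-values, updated incrementally in O(n) after each swap, and replaces the dicts by plain lists indexed by position. Pre_ excludes ragged graphs (a row shorter than len(graph)), on which A raises IndexError except when it accidentally never reads a missing entry, while B always reads the full n-by-n matrix and raises.
-- outside the precondition, e.g. on Kernigan_Lin_for_all_vertices_w_edge([[0, 0], []]): A returns ([0], [1], 0, 0), B raises IndexError
import Mathlib
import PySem

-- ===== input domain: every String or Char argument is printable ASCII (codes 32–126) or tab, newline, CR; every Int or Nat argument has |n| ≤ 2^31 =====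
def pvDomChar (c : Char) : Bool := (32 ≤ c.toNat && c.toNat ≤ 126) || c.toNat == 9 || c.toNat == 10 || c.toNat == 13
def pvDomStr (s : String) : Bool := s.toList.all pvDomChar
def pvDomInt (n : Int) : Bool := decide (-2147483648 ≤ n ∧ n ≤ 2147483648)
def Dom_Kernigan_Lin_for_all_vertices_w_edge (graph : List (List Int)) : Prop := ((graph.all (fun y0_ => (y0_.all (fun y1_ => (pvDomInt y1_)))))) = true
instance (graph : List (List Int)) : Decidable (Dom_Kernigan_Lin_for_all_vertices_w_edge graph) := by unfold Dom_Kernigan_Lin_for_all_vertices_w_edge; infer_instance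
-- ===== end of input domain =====

-- B replaces A's per-candidate rescan of both partitions (chcking_bet) by precomputed per-vertex
-- sum tables to the current A/B sides, updated incrementally after each swap, and plain lists instead of dicts.


-- ===== PORT A =====
-- graph[i][j]; under Pre_ both indices are always in range, so the defaults are never taken
-- (outside Pre_ the Python raises IndexError).  Used by both ports (it is just matrix access).
def pvG (graph : List (List Int)) (i j : Int) : Int :=
  PySem.List.pyGetD (PySem.List.pyGetD graph i []) j 0

-- helper checking_sze of A
def pvCheckingSze (graph : List (List Int)) (A B : List Int) : Int :=
  A.foldl (fun size i => B.foldl (fun size j => size + pvG graph i j) size) 0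

-- helper chcking_bet of A
def pvChckingBet (graph : List (List Int)) (i j : Int) (A B : List Int) : Int :=
  let bet := A.foldl (fun bet k => bet - pvG graph i k + pvG graph j k) 0
  let bet := B.foldl (fun bet k => bet - pvG graph j k + pvG graph i k) bet
  bet + pvG graph i i + pvG graph j j - 2 * pvG graph i j

-- body of A's inner 'for ht in B.keys()' loop; state (best, best_vert, step)
def pvAinner (graph : List (List Int)) (A B : PySem.Dict Int Int) (th : Int)
    (acc : Int × Option Int × Int) (ht : Int) : Int × Option Int × Int :=
  if pvG graph th ht = 1 then
    let step := acc.2.2 + 1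
    let bt := pvChckingBet graph th ht A.values B.values
    if bt > acc.1 then (bt, some ht, step) else (acc.1, acc.2.1, step)
  else acc

-- body of A's outer 'for th in A.keys()' loop; state (A, B, cut, step)
def pvAouter (graph : List (List Int))
    (st : PySem.Dict Int Int × PySem.Dict Int Int × Int × Int) (th : Int) :
    PySem.Dict Int Int × PySem.Dict Int Int × Int × Int :=
  let (A, B, cut, step) := st
  let r := B.keys.foldl (pvAinner graph A B th) (0, none, step)
  match r.2.1 with
  | some bv => (A.insert th (B.getD bv 0), B.insert bv th, cut + r.1, r.2.2)
  | none => (A, B, cut, r.2.2)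

def Kernigan_Lin_for_all_vertices_w_edge (graph : List (List Int)) : List Int × List Int × Int × Int :=
  let n : Int := graph.length
  let h := PySem.Int.floordiv n 2
  let A0 := (PySem.List.pyRange 0 h 1).foldl (fun d v => d.insert v v) (PySem.Dict.empty : PySem.Dict Int Int)
  let B0 := (PySem.List.pyRange h n 1).foldl (fun d v => d.insert v v) (PySem.Dict.empty : PySem.Dict Int Int)
  let cut := pvCheckingSze graph A0.keys B0.keys
  -- the 'while chck' body ends in an unconditional 'return', so it executes exactly once
  let st := A0.keys.foldl (pvAouter graph) (A0, B0, cut, 0)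
  (st.1.values, st.2.1.values, st.2.2.1, st.2.2.2)

-- ===== PORT B =====
-- body of B's inner 'for ht in range(h, n)' loop; gain in O(1) from the sum tables SA/SB
def pvBinner (graph : List (List Int)) (SA SB : List Int) (th : Int)
    (acc : Int × Option Int × Int) (ht : Int) : Int × Option Int × Int :=
  if pvG graph th ht = 1 then
    let step := acc.2.2 + 1
    let bt := (PySem.List.pyGetD SA ht 0 - PySem.List.pyGetD SA th 0)
              + (PySem.List.pyGetD SB th 0 - PySem.List.pyGetD SB ht 0)
              + pvG graph th th + pvG graph ht ht - 2 * pvG graph th ht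
    if bt > acc.1 then (bt, some ht, step) else (acc.1, acc.2.1, step)
  else acc

-- body of B's outer 'for th in range(h)' loop; state (Aval, Bval, SA, SB, cut, step)
def pvBouter (graph : List (List Int)) (h n : Int)
    (st : List Int × List Int × List Int × List Int × Int × Int) (th : Int) :
    List Int × List Int × List Int × List Int × Int × Int :=
  let (Aval, Bval, SA, SB, cut, step) := st
  let r := (PySem.List.pyRange h n 1).foldl (pvBinner graph SA SB th) (0, none, step)
  match r.2.1 with
  | none => (Aval, Bval, SA, SB, cut, r.2.2)
  | some bv =>
    let pos := bv - h
    let w := PySem.List.pyGetD Bval pos 0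
    let Aval' := PySem.List.pySetD Aval th w
    let Bval' := PySem.List.pySetD Bval pos th
    -- 'for v in range(n): d = g[v][w]-g[v][th]; SA[v] += d; SB[v] -= d'
    let upd := (PySem.List.pyRange 0 n 1).foldl (fun (p : List Int × List Int) v =>
        (PySem.List.pySetD p.1 v (PySem.List.pyGetD p.1 v 0 + (pvG graph v w - pvG graph v th)),
         PySem.List.pySetD p.2 v (PySem.List.pyGetD p.2 v 0 - (pvG graph v w - pvG graph v th)))) (SA, SB)
    (Aval', Bval', upd.1, upd.2, cut + r.1, r.2.2)

def Kernigan_Lin_for_all_vertices_w_edge_alt (graph : List (List Int)) : List Int × List Int × Int × Int :=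
  let n : Int := graph.length
  let h := PySem.Int.floordiv n 2
  let SA := (PySem.List.pyRange 0 n 1).map (fun v => ((PySem.List.pyRange 0 h 1).map (fun k => pvG graph v k)).sum)
  let SB := (PySem.List.pyRange 0 n 1).map (fun v => ((PySem.List.pyRange h n 1).map (fun k => pvG graph v k)).sum)
  let cut := ((PySem.List.pyRange 0 h 1).map (fun i => PySem.List.pyGetD SB i 0)).sum
  let st := (PySem.List.pyRange 0 h 1).foldl (pvBouter graph h n)
      (PySem.List.pyRange 0 h 1, PySem.List.pyRange h n 1, SA, SB, cut, 0)
  (st.1, st.2.1, st.2.2.2.2.1, st.2.2.2.2.2)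

-- ===== PRECONDITION & SPEC =====
-- Pre_ excludes ragged graphs (a row shorter than len(graph)): on those A raises IndexError except
-- when it accidentally never reads a missing entry, while B always reads the full matrix and raises.
def Pre_Kernigan_Lin_for_all_vertices_w_edge (graph : List (List Int)) : Prop :=
  ∀ row ∈ graph, graph.length ≤ row.length
instance (graph : List (List Int)) : Decidable (Pre_Kernigan_Lin_for_all_vertices_w_edge graph) := by
  unfold Pre_Kernigan_Lin_for_all_vertices_w_edge; infer_instance
def pvWitness_Kernigan_Lin_for_all_vertices_w_edge : List (List Int) := [[0, 1], [1, 0]]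

def Spec_Kernigan_Lin_for_all_vertices_w_edge (graph : List (List Int)) (out : List Int × List Int × Int × Int) : Prop := out = Kernigan_Lin_for_all_vertices_w_edge_alt graph
instance (graph : List (List Int)) (out : List Int × List Int × Int × Int) : Decidable (Spec_Kernigan_Lin_for_all_vertices_w_edge graph out) := by unfold Spec_Kernigan_Lin_for_all_vertices_w_edge; infer_instance

-- ===== CLAIM (what is proved, stated in full; the proofs are below) =====
def Claim_equal_Kernigan_Lin_for_all_vertices_w_edge : Prop := ∀ (graph : List (List Int)), Dom_Kernigan_Lin_for_all_vertices_w_edge graph → Pre_Kernigan_Lin_for_all_vertices_w_edge graph → Spec_Kernigan_Lin_for_all_vertices_w_edge graph (Kernigan_Lin_for_all_vertices_w_edge graph)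


-- ===== LEMMAS AND PROOFS =====

-- sum of a vertex's edge weights into the list L of vertices
def pvSum (graph : List (List Int)) (v : Int) (L : List Int) : Int :=
  (L.map (fun k => pvG graph v k)).sum

lemma pvFoldl_subadd (f1 f2 : Int → Int) : ∀ (L : List Int) (c : Int),
    L.foldl (fun bet k => bet - f1 k + f2 k) c = c + (L.map f2).sum - (L.map f1).sum := by
  intro L
  induction L with
  | nil => intro c; simp
  | cons a t ih => intro c; simp only [List.foldl_cons, ih, List.map_cons, List.sum_cons]; ring

lemma pvBet_eq (graph : List (List Int)) (i j : Int) (A B : List Int) :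
    pvChckingBet graph i j A B =
      (pvSum graph j A - pvSum graph i A) + (pvSum graph i B - pvSum graph j B)
      + pvG graph i i + pvG graph j j - 2 * pvG graph i j := by
  simp only [pvChckingBet, pvFoldl_subadd, pvSum]; ring

lemma pvSze_eq (graph : List (List Int)) (A B : List Int) :
    pvCheckingSze graph A B = (A.map (fun i => pvSum graph i B)).sum := by
  unfold pvCheckingSze
  have h1 : List.foldl (fun size i => List.foldl (fun size j => size + pvG graph i j) size B) 0 A
      = List.foldl (fun size i => size + pvSum graph i B) 0 A := by
    apply PySem.List.foldl_congr_mem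
    intro acc x _
    rw [PySem.List.foldl_add (g := fun j => pvG graph x j)]; rfl
  rw [h1, PySem.List.foldl_add (g := fun i => pvSum graph i B)]
  simp

lemma pvZip_keys (ks vs : List Int) (h : ks.length = vs.length) :
    (PySem.Dict.mk (ks.zip vs)).keys = ks := by
  show (ks.zip vs).map Prod.fst = ks
  exact List.map_fst_zip (by omega)

lemma pvZip_values (ks vs : List Int) (h : ks.length = vs.length) :
    (PySem.Dict.mk (ks.zip vs)).values = vs := by
  show (ks.zip vs).map Prod.snd = vs
  exact List.map_snd_zip (by omega)

lemma pvZip_getD (ks vs : List Int) (hnd : ks.Nodup) (h : ks.length = vs.length)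
    (i : Nat) (hi : i < ks.length) (d0 : Int) :
    (PySem.Dict.mk (ks.zip vs)).getD ks[i] d0 = vs[i]'(by omega) := by
  apply PySem.Dict.getD_of_mem_items
  · have h2 : (ks.zip vs)[i]'(by simp; omega) = (ks[i], vs[i]'(by omega)) := by
      simp [List.getElem_zip]
    rw [← h2]; exact List.getElem_mem _
  · rw [pvZip_keys ks vs h]; exact hnd

lemma pvZip_map_if (x v : Int) : ∀ (ks vs : List Int), ks.Nodup → ks.length = vs.length →
    (i : Nat) → (hi : i < ks.length) → ks[i] = x →
    ((ks.zip vs).map (fun p => if p.1 == x then (x, v) else p)) = ks.zip (vs.set i v) := by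
  intro ks
  induction ks with
  | nil => intro vs _ _ i hi; simp at hi
  | cons a t ih =>
    intro vs hnd hlen i hi hx
    cases vs with
    | nil => simp at hlen
    | cons b tv =>
      cases i with
      | zero =>
        simp only [List.getElem_cons_zero] at hx
        subst hx
        have hid : ∀ p ∈ t.zip tv, (if p.1 == a then (a, v) else p) = p := by
          intro p hp
          have hpa : ¬ (p.1 == a) = true := by
            simp only [beq_iff_eq]
            intro he
            exact (List.nodup_cons.mp hnd).1 (he ▸ (List.of_mem_zip hp).1)
          simp [hpa]
        simp only [List.zip_cons_cons, List.map_cons, List.set_cons_zero]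
        rw [List.map_congr_left hid, List.map_id']
        simp
      | succ k =>
        simp only [List.getElem_cons_succ] at hx
        have hna : ¬ (a == x) = true := by
          simp only [beq_iff_eq]
          intro he
          exact (List.nodup_cons.mp hnd).1 (he ▸ (hx ▸ List.getElem_mem _))
        simp only [List.zip_cons_cons, List.map_cons, List.set_cons_succ]
        rw [ih tv (List.nodup_cons.mp hnd).2 (by simpa using hlen) k (by simpa using hi) hx]
        simp [hna]

lemma pvZip_insert (ks vs : List Int) (hnd : ks.Nodup) (h : ks.length = vs.length)
    (i : Nat) (hi : i < ks.length) (v : Int) :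
    (PySem.Dict.mk (ks.zip vs)).insert ks[i] v = PySem.Dict.mk (ks.zip (vs.set i v)) := by
  apply PySem.Dict.ext
  have hc : (PySem.Dict.mk (ks.zip vs)).contains ks[i] = true := by
    rw [PySem.Dict.contains_iff_mem_keys, pvZip_keys ks vs h]
    exact List.getElem_mem _
  rw [PySem.Dict.items_insert_of_contains _ v hc]
  exact pvZip_map_if ks[i] v ks vs hnd h i hi rfl

lemma pvZipSelf (l : List Int) : l.map (fun v => (v, v)) = l.zip l := by
  induction l with
  | nil => rfl
  | cons a t ih => simp [ih]

lemma pvDictRange (a b : Int) :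
    ((PySem.List.pyRange a b 1).foldl (fun d v => d.insert v v)
        (PySem.Dict.empty : PySem.Dict Int Int))
      = PySem.Dict.mk ((PySem.List.pyRange a b 1).zip (PySem.List.pyRange a b 1)) := by
  apply PySem.Dict.ext
  have hit := PySem.Dict.items_foldl_insert_fresh (PySem.List.pyRange a b 1)
      (fun x => x) (fun x => x) PySem.Dict.empty
      (fun x _ => PySem.Dict.contains_empty x)
      (by simpa using PySem.List.nodup_pyRange_one a b)
  exact hit.trans (by simpa using pvZipSelf (PySem.List.pyRange a b 1))

lemma pvFoldl_opt (F : (Int × Option Int × Int) → Int → (Int × Option Int × Int))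
    (hF : ∀ acc x, (F acc x).2.1 = acc.2.1 ∨ (F acc x).2.1 = some x) :
    ∀ (l : List Int) (acc : Int × Option Int × Int),
      (l.foldl F acc).2.1 = acc.2.1 ∨ ∃ x ∈ l, (l.foldl F acc).2.1 = some x := by
  intro l
  induction l with
  | nil => intro acc; left; rfl
  | cons a t ih =>
    intro acc
    rw [List.foldl_cons]
    rcases ih (F acc a) with h | ⟨x, hx, he⟩
    · rcases hF acc a with h2 | h2
      · left; rw [h, h2]
      · right; exact ⟨a, by simp, by rw [h, h2]⟩
    · right; exact ⟨x, by simp [hx], he⟩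

lemma pvSetStep (L : List Int) (u : Int → Nat → Int) (m : Nat) :
    (L.zipIdx.map (fun q => if q.2 < m then u q.1 q.2 else q.1)).set m
      (u ((L.zipIdx.map (fun q => if q.2 < m then u q.1 q.2 else q.1)).getD m 0) m)
    = L.zipIdx.map (fun q => if q.2 < m + 1 then u q.1 q.2 else q.1) := by
  apply List.ext_getElem
  · simp
  · intro j hj hj'
    simp only [List.length_set, List.length_map, List.length_zipIdx] at hj
    rw [List.getElem_set]
    by_cases hjm : m = j
    · subst hjm
      have hgd : (L.zipIdx.map (fun q => if q.2 < m then u q.1 q.2 else q.1)).getD m 0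
          = L[m]'(by omega) := by
        rw [List.getD_eq_getElem _ _ (by simp; omega)]
        simp [List.getElem_zipIdx]
      rw [if_pos rfl, hgd]
      simp [List.getElem_zipIdx]
    · rw [if_neg hjm]
      simp only [List.getElem_map, List.getElem_zipIdx]
      have : (j < m) = (j < m + 1) := by
        apply propext; constructor <;> intro <;> omega
      split_ifs <;> first | rfl | omega

lemma pvUpdFold (f : Int → Int) : ∀ (m : Nat) (SA SB : List Int),
    (PySem.List.pyRange 0 (m : Int) 1).foldl (fun (p : List Int × List Int) v =>
        (PySem.List.pySetD p.1 v (PySem.List.pyGetD p.1 v 0 + f v),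
         PySem.List.pySetD p.2 v (PySem.List.pyGetD p.2 v 0 - f v))) (SA, SB)
      = (SA.zipIdx.map (fun q => if q.2 < m then q.1 + f q.2 else q.1),
         SB.zipIdx.map (fun q => if q.2 < m then q.1 - f q.2 else q.1)) := by
  intro m
  induction m with
  | zero =>
    intro SA SB
    rw [show ((0:Nat):Int) = 0 by norm_num, PySem.List.pyRange_one_eq_nil (by norm_num)]
    simp
  | succ m ih =>
    intro SA SB
    rw [show ((m+1:Nat):Int) = (m:Int) + 1 by push_cast; ring,
        PySem.List.pyRange_one_succ_right (by positivity), List.foldl_append, ih]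
    simp only [List.foldl_cons, List.foldl_nil, PySem.List.pySetD_natCast, PySem.List.pyGetD_natCast]
    exact Prod.ext (pvSetStep SA (fun a k => a + f (k : Int)) m)
                   (pvSetStep SB (fun a k => a - f (k : Int)) m)

lemma pvSum_set' (l : List Int) (i : Nat) (hi : i < l.length) (x : Int) :
    (l.set i x).sum = l.sum - l[i] + x := by
  rw [List.sum_set]
  simp only [hi, if_pos]
  rw [← List.sum_take_add_sum_drop l i, List.drop_eq_getElem_cons hi]
  simp only [List.sum_cons]
  ring

lemma pvSum_set (graph : List (List Int)) (v : Int) (L : List Int) (i : Nat)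
    (hi : i < L.length) (x : Int) :
    pvSum graph v (L.set i x) = pvSum graph v L - pvG graph v (L[i]) + pvG graph v x := by
  unfold pvSum
  rw [List.map_set, pvSum_set' _ i (by simpa using hi)]
  simp

-- the coupling invariant between A's loop state (dicts) and B's loop state (lists + sum tables)
def pvRel (graph : List (List Int)) (t : Int)
    (a : PySem.Dict Int Int × PySem.Dict Int Int × Int × Int)
    (b : List Int × List Int × List Int × List Int × Int × Int) : Prop :=
  a.1 = PySem.Dict.mk ((PySem.List.pyRange 0 (PySem.Int.floordiv (graph.length : Int) 2) 1).zip b.1) ∧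
  a.2.1 = PySem.Dict.mk ((PySem.List.pyRange (PySem.Int.floordiv (graph.length : Int) 2) (graph.length : Int) 1).zip b.2.1) ∧
  b.1.length = (PySem.Int.floordiv (graph.length : Int) 2).toNat ∧
  b.2.1.length = ((graph.length : Int) - PySem.Int.floordiv (graph.length : Int) 2).toNat ∧
  b.2.2.1.length = graph.length ∧ b.2.2.2.1.length = graph.length ∧
  (∀ v : Nat, v < graph.length →
      b.2.2.1.getD v 0 = pvSum graph v b.1 ∧ b.2.2.2.1.getD v 0 = pvSum graph v b.2.1) ∧
  (∀ k : Nat, t.toNat ≤ k → k < b.1.length → b.1.getD k 0 = (k : Int)) ∧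
  a.2.2.1 = b.2.2.2.2.1 ∧ a.2.2.2 = b.2.2.2.2.2

lemma pvStep (graph : List (List Int)) (t : Int) (ht0 : 0 ≤ t)
    (htlt : t < PySem.Int.floordiv (graph.length : Int) 2)
    (a : PySem.Dict Int Int × PySem.Dict Int Int × Int × Int)
    (b : List Int × List Int × List Int × List Int × Int × Int)
    (hrel : pvRel graph t a b) :
    pvRel graph (t + 1) (pvAouter graph a t)
      (pvBouter graph (PySem.Int.floordiv (graph.length : Int) 2) (graph.length : Int) b t) := by
  obtain ⟨A, B, cutA, stepA⟩ := a
  obtain ⟨Aval, Bval, SA, SB, cutB, stepB⟩ := b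
  unfold pvRel at hrel
  obtain ⟨h1, h2, h3, h4, h5, h6, h7, h8, h9, h10⟩ := hrel
  simp only at h1 h2 h3 h4 h5 h6 h7 h8 h9 h10
  set n : Int := (graph.length : Int) with hn
  set h : Int := PySem.Int.floordiv n 2 with hhdef
  have hn0 : (0:Int) ≤ n := by rw [hn]; positivity
  have hh2 : h = n / 2 := by rw [hhdef]; exact PySem.Int.floordiv_eq_ediv_of_pos (by norm_num)
  have hh0 : (0:Int) ≤ h := by rw [hh2]; omega
  have hhn : h ≤ n := by rw [hh2]; omega
  have hksl : (PySem.List.pyRange 0 h 1).length = Aval.length := by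
    rw [PySem.List.length_pyRange_one]; omega
  have hksl' : (PySem.List.pyRange h n 1).length = Bval.length := by
    rw [PySem.List.length_pyRange_one]; omega
  have hAvals : A.values = Aval := by rw [h1]; exact pvZip_values _ _ hksl
  have hBvals : B.values = Bval := by rw [h2]; exact pvZip_values _ _ hksl'
  have hBkeys : B.keys = PySem.List.pyRange h n 1 := by rw [h2]; exact pvZip_keys _ _ hksl'
  have hget : ∀ (L : List Int) (v : Int), 0 ≤ v → v < n → L.length = graph.length →
      PySem.List.pyGetD L v 0 = L.getD v.toNat 0 := by
    intro L v hv0 hvn hlen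
    rw [PySem.List.pyGetD_eq_getElem L 0 hv0 (by omega), List.getD_eq_getElem _ _ (by omega)]
  have hSA : ∀ (v : Int), 0 ≤ v → v < n → PySem.List.pyGetD SA v 0 = pvSum graph v Aval := by
    intro v hv0 hvn
    rw [hget SA v hv0 hvn h5, (h7 v.toNat (by omega)).1, Int.toNat_of_nonneg hv0]
  have hSB : ∀ (v : Int), 0 ≤ v → v < n → PySem.List.pyGetD SB v 0 = pvSum graph v Bval := by
    intro v hv0 hvn
    rw [hget SB v hv0 hvn h6, (h7 v.toNat (by omega)).2, Int.toNat_of_nonneg hv0]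
  have hinner : ∀ acc, List.foldl (pvAinner graph A B t) acc (PySem.List.pyRange h n 1)
      = List.foldl (pvBinner graph SA SB t) acc (PySem.List.pyRange h n 1) := by
    intro acc
    apply PySem.List.foldl_congr_mem
    intro acc ht hmem
    obtain ⟨hht1, hht2⟩ := PySem.List.mem_pyRange_one.mp hmem
    by_cases hg : pvG graph t ht = 1
    · have hbt : pvChckingBet graph t ht A.values B.values
          = (PySem.List.pyGetD SA ht 0 - PySem.List.pyGetD SA t 0)
            + (PySem.List.pyGetD SB t 0 - PySem.List.pyGetD SB ht 0)
            + pvG graph t t + pvG graph ht ht - 2 * pvG graph t ht := by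
        rw [hAvals, hBvals, pvBet_eq, hSA ht (by omega) hht2, hSA t ht0 (by omega),
            hSB t ht0 (by omega), hSB ht (by omega) hht2]
      simp only [pvAinner, pvBinner, if_pos hg, hbt]
    · simp only [pvAinner, pvBinner, if_neg hg]
  have hoptF : ∀ acc x, ((pvAinner graph A B t) acc x).2.1 = acc.2.1
      ∨ ((pvAinner graph A B t) acc x).2.1 = some x := by
    intro acc x
    simp only [pvAinner]
    split_ifs <;> simp
  have hopt := pvFoldl_opt (pvAinner graph A B t) hoptF (PySem.List.pyRange h n 1) (0, none, stepB)
  rw [hinner] at hopt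
  simp only at hopt
  show pvRel graph (t + 1) (pvAouter graph (A, B, cutA, stepA) t)
      (pvBouter graph h n (Aval, Bval, SA, SB, cutB, stepB) t)
  unfold pvAouter pvBouter
  dsimp only
  rw [hBkeys, h10, hinner]
  rcases hopt with hnone | ⟨bv, hbvmem, hsome⟩
  · rw [hnone]
    refine ⟨h1, h2, h3, h4, h5, h6, h7, ?_, h9, rfl⟩
    intro k hk1 hk2
    exact h8 k (by omega) hk2
  · obtain ⟨hbv1, hbv2⟩ := PySem.List.mem_pyRange_one.mp hbvmem
    rw [hsome]
    dsimp only
    have hit : t.toNat < Aval.length := by omega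
    have hib : (bv - h).toNat < Bval.length := by omega
    have htk : (PySem.List.pyRange 0 h 1)[t.toNat]'(by omega) = t := by
      rw [PySem.List.getElem_pyRange_one]; omega
    have hbk : (PySem.List.pyRange h n 1)[(bv - h).toNat]'(by omega) = bv := by
      rw [PySem.List.getElem_pyRange_one]; omega
    have hw2 : PySem.List.pyGetD Bval (bv - h) 0 = Bval[(bv - h).toNat]'hib := by
      rw [PySem.List.pyGetD_eq_getElem Bval 0 (by omega) (by omega)]
    have hw : B.getD bv 0 = Bval[(bv - h).toNat]'hib := by
      have hz := pvZip_getD (PySem.List.pyRange h n 1) Bval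
        (PySem.List.nodup_pyRange_one h n) hksl' ((bv - h).toNat) (by omega) 0
      rw [hbk] at hz
      rw [h2]; exact hz
    have hAt : Aval[t.toNat]'hit = t := by
      have h8t := h8 t.toNat le_rfl hit
      rw [List.getD_eq_getElem _ _ hit] at h8t
      rw [h8t]; omega
    have hAins : A.insert t (B.getD bv 0)
        = PySem.Dict.mk ((PySem.List.pyRange 0 h 1).zip (Aval.set t.toNat (Bval[(bv - h).toNat]'hib))) := by
      rw [h1, hw]
      conv_lhs => rw [← htk]
      exact pvZip_insert _ _ (PySem.List.nodup_pyRange_one 0 h) hksl _ (by omega) _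
    have hBins : B.insert bv t
        = PySem.Dict.mk ((PySem.List.pyRange h n 1).zip (Bval.set (bv - h).toNat t)) := by
      rw [h2]
      conv_lhs => rw [← hbk]
      exact pvZip_insert _ _ (PySem.List.nodup_pyRange_one h n) hksl' _ (by omega) _
    rw [hw2, hn, pvUpdFold (fun v => pvG graph v (Bval[(bv - h).toNat]'hib) - pvG graph v t) graph.length SA SB]
    have hSA'get : ∀ v : Nat, v < graph.length →
        (SA.zipIdx.map (fun q => if q.2 < graph.length then
            q.1 + (pvG graph q.2 (Bval[(bv - h).toNat]'hib) - pvG graph q.2 t) else q.1)).getD v 0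
        = SA.getD v 0 + (pvG graph v (Bval[(bv - h).toNat]'hib) - pvG graph v t) := by
      intro v hv
      rw [List.getD_eq_getElem _ _ (by simp [h5]; omega), List.getD_eq_getElem _ _ (by omega)]
      simp [List.getElem_zipIdx, hv]
    have hSB'get : ∀ v : Nat, v < graph.length →
        (SB.zipIdx.map (fun q => if q.2 < graph.length then
            q.1 - (pvG graph q.2 (Bval[(bv - h).toNat]'hib) - pvG graph q.2 t) else q.1)).getD v 0
        = SB.getD v 0 - (pvG graph v (Bval[(bv - h).toNat]'hib) - pvG graph v t) := by
      intro v hv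
      rw [List.getD_eq_getElem _ _ (by simp [h6]; omega), List.getD_eq_getElem _ _ (by omega)]
      simp [List.getElem_zipIdx, hv]
    rw [PySem.List.pySetD_of_nonneg Aval _ ht0, PySem.List.pySetD_of_nonneg Bval _ (by omega)]
    unfold pvRel
    dsimp only
    refine ⟨hAins, hBins, by simp only [List.length_set]; exact h3,
        by simp only [List.length_set]; exact h4,
        by simp only [List.length_map, List.length_zipIdx]; exact h5,
        by simp only [List.length_map, List.length_zipIdx]; exact h6, ?_, ?_, by rw [h9], rfl⟩
    · intro v hv
      constructor
      · rw [hSA'get v hv, (h7 v hv).1,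
            pvSum_set graph v Aval t.toNat hit _, hAt]
        ring
      · rw [hSB'get v hv, (h7 v hv).2,
            pvSum_set graph v Bval (bv - h).toNat hib _]
        ring
    · intro k hk1 hk2
      rw [List.length_set] at hk2
      rw [List.getD_eq_getElem _ _ (by simpa using hk2), List.getElem_set, if_neg (by omega)]
      have h8k := h8 k (by omega) hk2
      rw [List.getD_eq_getElem _ _ hk2] at h8k
      exact h8k

lemma pvMain (graph : List (List Int)) : ∀ (m : Nat) (t : Int), 0 ≤ t →
    (PySem.Int.floordiv (graph.length : Int) 2 - t).toNat = m →
    ∀ (a : PySem.Dict Int Int × PySem.Dict Int Int × Int × Int)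
      (b : List Int × List Int × List Int × List Int × Int × Int), pvRel graph t a b →
      (((PySem.List.pyRange t (PySem.Int.floordiv (graph.length : Int) 2) 1).foldl (pvAouter graph) a).1.values
        = ((PySem.List.pyRange t (PySem.Int.floordiv (graph.length : Int) 2) 1).foldl
            (pvBouter graph (PySem.Int.floordiv (graph.length : Int) 2) (graph.length : Int)) b).1) ∧
      (((PySem.List.pyRange t (PySem.Int.floordiv (graph.length : Int) 2) 1).foldl (pvAouter graph) a).2.1.values
        = ((PySem.List.pyRange t (PySem.Int.floordiv (graph.length : Int) 2) 1).foldl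
            (pvBouter graph (PySem.Int.floordiv (graph.length : Int) 2) (graph.length : Int)) b).2.1) ∧
      (((PySem.List.pyRange t (PySem.Int.floordiv (graph.length : Int) 2) 1).foldl (pvAouter graph) a).2.2.1
        = ((PySem.List.pyRange t (PySem.Int.floordiv (graph.length : Int) 2) 1).foldl
            (pvBouter graph (PySem.Int.floordiv (graph.length : Int) 2) (graph.length : Int)) b).2.2.2.2.1) ∧
      (((PySem.List.pyRange t (PySem.Int.floordiv (graph.length : Int) 2) 1).foldl (pvAouter graph) a).2.2.2
        = ((PySem.List.pyRange t (PySem.Int.floordiv (graph.length : Int) 2) 1).foldl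
            (pvBouter graph (PySem.Int.floordiv (graph.length : Int) 2) (graph.length : Int)) b).2.2.2.2.2) := by
  intro m
  induction m with
  | zero =>
    intro t ht0 hm a b hrel
    have hnil : PySem.List.pyRange t (PySem.Int.floordiv (graph.length : Int) 2) 1 = [] :=
      PySem.List.pyRange_one_eq_nil (by omega)
    rw [hnil]
    obtain ⟨h1, h2, h3, h4, h5, h6, h7, h8, h9, h10⟩ := hrel
    simp only [List.foldl_nil]
    refine ⟨?_, ?_, h9, h10⟩
    · rw [h1]; exact pvZip_values _ _ (by rw [PySem.List.length_pyRange_one]; omega)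
    · rw [h2]; exact pvZip_values _ _ (by rw [PySem.List.length_pyRange_one]; omega)
  | succ m ih =>
    intro t ht0 hm a b hrel
    have htlt : t < PySem.Int.floordiv (graph.length : Int) 2 := by omega
    rw [PySem.List.pyRange_one_cons htlt, List.foldl_cons, List.foldl_cons]
    exact ih (t + 1) (by omega) (by omega) _ _ (pvStep graph t ht0 htlt a b hrel)



-- ===== VERDICT (by name: the statement is the Claim_ definition above) =====
theorem Kernigan_Lin_for_all_vertices_w_edge_spec : Claim_equal_Kernigan_Lin_for_all_vertices_w_edge := by
  intro graph _ _
  show Kernigan_Lin_for_all_vertices_w_edge graph = Kernigan_Lin_for_all_vertices_w_edge_alt graph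
  have hh2 : PySem.Int.floordiv (graph.length : Int) 2 = (graph.length : Int) / 2 :=
    PySem.Int.floordiv_eq_ediv_of_pos (by norm_num)
  unfold Kernigan_Lin_for_all_vertices_w_edge Kernigan_Lin_for_all_vertices_w_edge_alt
  dsimp only
  rw [pvDictRange 0 (PySem.Int.floordiv (graph.length : Int) 2),
      pvDictRange (PySem.Int.floordiv (graph.length : Int) 2) (graph.length : Int),
      pvZip_keys (PySem.List.pyRange 0 (PySem.Int.floordiv (graph.length : Int) 2) 1) _ rfl,
      pvZip_keys (PySem.List.pyRange (PySem.Int.floordiv (graph.length : Int) 2) (graph.length : Int) 1) _ rfl]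
  set n : Int := (graph.length : Int) with hn
  set h : Int := PySem.Int.floordiv n 2 with hhdef
  have hn0 : (0:Int) ≤ n := by rw [hn]; positivity
  have hh0 : (0:Int) ≤ h := by rw [hh2]; omega
  have hhn : h ≤ n := by rw [hh2]; omega
  set SA0 : List Int := (PySem.List.pyRange 0 n 1).map
      (fun v => ((PySem.List.pyRange 0 h 1).map (fun k => pvG graph v k)).sum) with hSA0
  set SB0 : List Int := (PySem.List.pyRange 0 n 1).map
      (fun v => ((PySem.List.pyRange h n 1).map (fun k => pvG graph v k)).sum) with hSB0
  set cutB : Int := ((PySem.List.pyRange 0 h 1).map (fun i => PySem.List.pyGetD SB0 i 0)).sum with hcutB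
  have hcut : pvCheckingSze graph (PySem.List.pyRange 0 h 1) (PySem.List.pyRange h n 1) = cutB := by
    rw [pvSze_eq, hcutB]
    congr 1
    apply List.map_congr_left
    intro i hi
    obtain ⟨hi0, hih⟩ := PySem.List.mem_pyRange_one.mp hi
    rw [hSB0, PySem.List.pyGetD_map_pyRange_of_nonneg _ n i 0 hi0 (by omega)]
    rfl
  rw [hcut]
  have hrel0 : pvRel graph 0
      (PySem.Dict.mk ((PySem.List.pyRange 0 h 1).zip (PySem.List.pyRange 0 h 1)),
       PySem.Dict.mk ((PySem.List.pyRange h n 1).zip (PySem.List.pyRange h n 1)), cutB, 0)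
      (PySem.List.pyRange 0 h 1, PySem.List.pyRange h n 1, SA0, SB0, cutB, 0) := by
    unfold pvRel
    dsimp only
    refine ⟨rfl, rfl, by rw [PySem.List.length_pyRange_one, sub_zero],
        by rw [PySem.List.length_pyRange_one],
        by rw [hSA0]; simp only [List.length_map, PySem.List.length_pyRange_one]; omega,
        by rw [hSB0]; simp only [List.length_map, PySem.List.length_pyRange_one]; omega,
        ?_, ?_, rfl, rfl⟩
    · intro v hv
      constructor
      · rw [hSA0, List.getD_eq_getElem _ _
            (by simp only [List.length_map, PySem.List.length_pyRange_one]; omega),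
          List.getElem_map, PySem.List.getElem_pyRange_one]
        simp only [zero_add]
        rfl
      · rw [hSB0, List.getD_eq_getElem _ _
            (by simp only [List.length_map, PySem.List.length_pyRange_one]; omega),
          List.getElem_map, PySem.List.getElem_pyRange_one]
        simp only [zero_add]
        rfl
    · intro k hk1 hk2
      rw [List.getD_eq_getElem _ _ hk2, PySem.List.getElem_pyRange_one]
      simp
  obtain ⟨e1, e2, e3, e4⟩ := pvMain graph (h - 0).toNat 0 le_rfl rfl _ _ hrel0
  exact Prod.ext e1 (Prod.ext e2 (Prod.ext e3 e4))
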